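-- pv_equiv track=rewrite | github.com/minghao51/triangulate | src/ai/agents/classifier.py | classify_event_verification
-- ===== SOURCE A (Python) =====
-- from typing import Any
--
-- def classify_event_verification(
--     claims: list[dict[str, Any]], narrative_count: int
-- ) -> str:
--     """Assign verification status to an event based on its claims.
--
--     Args:
--         claims: List of claim dictionaries
--         narrative_count: Number of distinct narrative clusters
--
--     Returns:
--         Event verification status
--     """
--     if not claims:
--         return "ALLEGED"
--
--     # Count verification statuses of claims
--     status_counts = {}
--     for claim in claims:
--         status = claim.get("verification_status", "ALLEGED")
--         status_counts[status] = status_counts.get(status, 0) + 1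
--
--     # Determine overall status
--     confirmed = status_counts.get("CONFIRMED", 0)
--     probable = status_counts.get("PROBABLE", 0)
--     contested = status_counts.get("CONTESTED", 0)
--
--     total = len(claims)
--
--     # If there's significant disagreement
--     if contested > total / 3:
--         return "CONTESTED"
--
--     # If multiple narratives exist without agreement
--     if narrative_count > 2 and confirmed == 0:
--         return "CONTESTED"
--
--     # Strong corroboration
--     if confirmed > total / 2:
--         return "CONFIRMED"
--
--     # Good corroboration
--     if (confirmed + probable) > total / 2:
--         return "PROBABLE"
--
--     # Default to alleged
--     return "ALLEGED"
-- ===== SOURCE B (Python) =====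
-- def _run_length(sorted_statuses, status):
--     """Length of the run of `status` in an ascending-sorted list: skip the
--     strictly-smaller prefix, then count equal elements until the run ends."""
--     i = 0
--     n = len(sorted_statuses)
--     while i < n and sorted_statuses[i] < status:
--         i += 1
--     count = 0
--     while i < n and sorted_statuses[i] == status:
--         count += 1
--         i += 1
--     return count
--
--
-- def classify_event_verification(claims, narrative_count):
--     if not claims:
--         return "ALLEGED"
--     statuses = sorted(c.get("verification_status", "ALLEGED") for c in claims)
--     total = len(claims)
--     contested = _run_length(statuses, "CONTESTED")
--     if 3 * contested > total:
--         return "CONTESTED"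
--     confirmed = _run_length(statuses, "CONFIRMED")
--     if narrative_count > 2 and confirmed == 0:
--         return "CONTESTED"
--     if 2 * confirmed > total:
--         return "CONFIRMED"
--     probable = _run_length(statuses, "PROBABLE")
--     if 2 * (confirmed + probable) > total:
--         return "PROBABLE"
--     return "ALLEGED"
-- ===== Notes on version B (the rewrite author's own statement) =====
-- stated objective: alternative
-- what changed: Replaces the single-pass status-histogram dict with sort-then-scan: the projected statuses are sorted and each relevant tally is read off as the length of that status's contiguous run (skip the strictly-smaller prefix, count the equal run), with exact integer threshold comparisons replacing float division.
import Mathlib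
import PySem

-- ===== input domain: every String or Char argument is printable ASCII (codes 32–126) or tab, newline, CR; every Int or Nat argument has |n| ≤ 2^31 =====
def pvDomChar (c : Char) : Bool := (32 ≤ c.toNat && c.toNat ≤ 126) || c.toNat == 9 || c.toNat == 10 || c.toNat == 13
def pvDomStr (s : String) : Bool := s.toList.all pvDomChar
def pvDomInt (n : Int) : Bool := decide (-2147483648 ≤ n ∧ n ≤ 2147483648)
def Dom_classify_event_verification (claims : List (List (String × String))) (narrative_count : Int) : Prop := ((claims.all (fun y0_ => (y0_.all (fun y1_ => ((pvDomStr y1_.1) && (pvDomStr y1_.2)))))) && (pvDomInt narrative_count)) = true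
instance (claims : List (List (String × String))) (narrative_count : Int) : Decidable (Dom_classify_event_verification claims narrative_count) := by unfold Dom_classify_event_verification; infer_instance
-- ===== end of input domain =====

-- B replaces A's single-pass status-histogram dict with sort-then-scan (each tally is the run
-- length of its status in the sorted status list); objective: a genuinely different algorithm.


-- ===== PORT A =====
-- The float comparisons 'contested > total/3' and 'confirmed > total/2' are ported as the exact
-- integer comparisons '3*contested > total' / '2*confirmed > total': for |total| ≤ 2^31 the
-- double total/3 (total/2) differs from the rational by far less than the ≥ 1/3 gap to any
-- integer on the other side, so the comparisons are exact on Dom.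
def classify_event_verification (claims : List (List (String × String))) (narrative_count : Int) : String :=
  if claims = [] then "ALLEGED"
  else
    let status_counts : PySem.Dict String Int :=
      claims.foldl (fun d claim =>
        let status := (PySem.Dict.ofList claim).getD "verification_status" "ALLEGED"
        d.insert status (d.getD status 0 + 1)) PySem.Dict.empty
    let confirmed := status_counts.getD "CONFIRMED" 0
    let probable := status_counts.getD "PROBABLE" 0
    let contested := status_counts.getD "CONTESTED" 0
    let total : Int := claims.length
    if 3 * contested > total then "CONTESTED"
    else if narrative_count > 2 ∧ confirmed = 0 then "CONTESTED"
    else if 2 * confirmed > total then "CONFIRMED"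
    else if 2 * (confirmed + probable) > total then "PROBABLE"
    else "ALLEGED"

-- ===== PORT B =====
-- Source B's first while loop: advance past the strictly-smaller prefix of the sorted list.
def pvSkipLt (x : String) : List String → List String
  | [] => []
  | h :: t => if h < x then pvSkipLt x t else h :: t

-- Source B's second while loop: count the leading run of elements equal to x.
def pvCountRun (x : String) : List String → Int
  | [] => 0
  | h :: t => if h = x then pvCountRun x t + 1 else 0

def pvRunLength (sorted_statuses : List String) (status : String) : Int :=
  pvCountRun status (pvSkipLt status sorted_statuses)

def classify_event_verification_alt (claims : List (List (String × String))) (narrative_count : Int) : String :=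
  if claims = [] then "ALLEGED"
  else
    let statuses := PySem.List.sorted
      (claims.map (fun c => (PySem.Dict.ofList c).getD "verification_status" "ALLEGED"))
      (fun s => s) false
    let total : Int := claims.length
    let contested := pvRunLength statuses "CONTESTED"
    if 3 * contested > total then "CONTESTED"
    else
      let confirmed := pvRunLength statuses "CONFIRMED"
      if narrative_count > 2 ∧ confirmed = 0 then "CONTESTED"
      else if 2 * confirmed > total then "CONFIRMED"
      else
        let probable := pvRunLength statuses "PROBABLE"
        if 2 * (confirmed + probable) > total then "PROBABLE"
        else "ALLEGED"

-- ===== PRECONDITION & SPEC =====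
def Spec_classify_event_verification (claims : List (List (String × String))) (narrative_count : Int) (out : String) : Prop := out = classify_event_verification_alt claims narrative_count
instance (claims : List (List (String × String))) (narrative_count : Int) (out : String) : Decidable (Spec_classify_event_verification claims narrative_count out) := by unfold Spec_classify_event_verification; infer_instance

-- ===== CLAIM =====
def Claim_equal_classify_event_verification : Prop := ∀ (claims : List (List (String × String))) (narrative_count : Int), Dom_classify_event_verification claims narrative_count → Spec_classify_event_verification claims narrative_count (classify_event_verification claims narrative_count)

-- ===== LEMMAS AND PROOFS =====
-- A's histogram loop is Counter of the projected status list; its getD is then List.count.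
theorem pv_counts_eq {α : Type} (f : α → String) (xs : List α) (s : String) :
    (xs.foldl (fun d x => d.insert (f x) (d.getD (f x) 0 + 1)) PySem.Dict.empty).getD s 0
      = ((xs.map f).count s : Int) := by
  rw [← PySem.Dict.getD_counter, ← PySem.Dict.foldl_insert_getD_add_one_eq_counter,
      List.foldl_map]

-- In a list all of whose elements are ≥ x and which is sorted, the leading equal-run is count.
theorem pv_countRun_eq_count (x : String) (l : List String)
    (hs : l.Pairwise (· ≤ ·)) (hge : ∀ y ∈ l, x ≤ y) :
    pvCountRun x l = (l.count x : Int) := by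
  induction l with
  | nil => simp [pvCountRun]
  | cons h t ih =>
    rcases List.pairwise_cons.mp hs with ⟨hht, hts⟩
    by_cases hx : h = x
    · subst hx
      rw [pvCountRun, if_pos rfl, ih hts hht, List.count_cons_self]
      push_cast; ring
    · rw [pvCountRun, if_neg hx]
      have hxh : x < h := lt_of_le_of_ne (hge h (List.mem_cons_self)) (fun e => hx e.symm)
      have hct : t.count x = 0 :=
        List.count_eq_zero.mpr (fun hm => absurd (lt_of_lt_of_le hxh (hht x hm)) (lt_irrefl x))
      simp [hct, hx]

-- Skipping the strictly-smaller prefix then counting the run gives count in a sorted list.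
theorem pv_runLength_eq_count (x : String) (l : List String)
    (hs : l.Pairwise (· ≤ ·)) :
    pvRunLength l x = (l.count x : Int) := by
  induction l with
  | nil => simp [pvRunLength, pvSkipLt, pvCountRun]
  | cons h t ih =>
    rcases List.pairwise_cons.mp hs with ⟨hht, hts⟩
    by_cases hlt : h < x
    · have hx : h ≠ x := ne_of_lt hlt
      rw [pvRunLength, pvSkipLt, if_pos hlt]
      rw [pvRunLength] at ih
      rw [ih hts]
      simp [hx]
    · rw [pvRunLength, pvSkipLt, if_neg hlt]
      have hge : ∀ y ∈ h :: t, x ≤ y := by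
        intro y hy
        rcases List.mem_cons.mp hy with rfl | hyt
        · exact le_of_not_gt hlt
        · exact le_trans (le_of_not_gt hlt) (hht y hyt)
      exact pv_countRun_eq_count x (h :: t) hs hge

-- run length in the sorted status list = count in the unsorted status list
theorem pv_runLength_sorted (xs : List String) (s : String) :
    pvRunLength (PySem.List.sorted xs (fun x => x) false) s = (xs.count s : Int) := by
  rw [pv_runLength_eq_count s _ (PySem.List.sorted_pairwise xs (fun x => x)),
      (PySem.List.sorted_perm xs (fun x => x) false).count_eq]

-- ===== VERDICT =====
theorem classify_event_verification_spec : Claim_equal_classify_event_verification := by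
  intro claims narrative_count _
  unfold Spec_classify_event_verification classify_event_verification classify_event_verification_alt
  by_cases h : claims = []
  · simp [h]
  · simp only [h, if_false]
    simp only [pv_counts_eq, pv_runLength_sorted]
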